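-- pv_equiv track=rewrite | github.com/ucf-cs/Tervel | tervel/tests/scripts/execute_tests.py | getTestFlags
-- ===== SOURCE A (Python) =====
-- import itertools
--
-- def getTestFlags(t):
--     tflags = t['flags']
--     if not tflags or len(tflags) == 0:
--         return [""]
--
--     res = []
--     for k in tflags.keys():
--         temp = []
--         if len(tflags[k]) == 0:
--             continue
--         for v in tflags[k]:
--             temp.append("-%s=%s" %(k, str(v)))
--         res.append(temp)
--
--     res2 = []
--     for r in list(itertools.product(*res)):
--         res2.append(" ".join(r))
--     return res2
-- ===== SOURCE B (Python) =====
-- def getTestFlags(t):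
--     tflags = t['flags']
--     if not tflags:
--         return [""]
--     opts = [(k, tflags[k]) for k in tflags if tflags[k]]
--     total = 1
--     for _, vs in opts:
--         total *= len(vs)
--     out = []
--     for i in range(total):
--         rem = i
--         parts = []
--         for k, vs in reversed(opts):
--             rem, d = divmod(rem, len(vs))
--             parts.append("-%s=%s" % (k, vs[d]))
--         parts.reverse()
--         out.append(" ".join(parts))
--     return out
-- ===== Notes on version B (the rewrite author's own statement) =====
-- stated objective: alternative
-- what changed: Instead of materialising the Cartesian product of per-key flag lists (itertools.product) and joining each tuple, B computes the total count as the product of list lengths and, for each index i in range(total), decodes i as a mixed-radix number (divmod per key, rightmost fastest) to pick one value per key and build the joined string directly.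
import Mathlib
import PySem

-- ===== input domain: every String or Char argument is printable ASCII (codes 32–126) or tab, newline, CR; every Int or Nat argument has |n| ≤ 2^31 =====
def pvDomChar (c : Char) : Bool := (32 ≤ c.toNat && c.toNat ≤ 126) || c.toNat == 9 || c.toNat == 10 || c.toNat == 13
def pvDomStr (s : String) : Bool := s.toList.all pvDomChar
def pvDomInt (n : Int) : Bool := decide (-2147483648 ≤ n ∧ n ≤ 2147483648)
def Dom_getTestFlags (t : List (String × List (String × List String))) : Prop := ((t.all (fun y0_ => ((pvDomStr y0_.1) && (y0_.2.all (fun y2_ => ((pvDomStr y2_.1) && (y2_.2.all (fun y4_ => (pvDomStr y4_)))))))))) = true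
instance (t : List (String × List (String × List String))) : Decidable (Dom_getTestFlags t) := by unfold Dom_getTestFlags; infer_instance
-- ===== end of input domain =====

-- B replaces itertools.product + ' '.join by mixed-radix decoding of each output index (objective: alternative, same cost).

-- ===== PORT A =====
-- itertools.product(*ls) as a list of lists, rightmost factor varying fastest (exact CPython order)
def pyProduct (ls : List (List String)) : List (List String) :=
  match ls with
  | [] => [[]]
  | l :: rest => l.flatMap (fun x => (pyProduct rest).map (fun r => x :: r))

def getTestFlags (t : List (String × List (String × List String))) : List String :=
  match (PySem.Dict.mk t).get? "flags" with
  | none => []  -- Python raises KeyError here; excluded by Pre_getTestFlags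
  | some tflags =>
    if tflags.isEmpty then [""]
    else
      let res := tflags.foldl (fun res kp =>
        let vs := ((PySem.Dict.mk tflags).get? kp.1).getD []  -- tflags[k]; k comes from keys, so never a KeyError
        if vs.length = 0 then res
        else res ++ [vs.foldl (fun temp v => temp ++ ["-" ++ kp.1 ++ "=" ++ v]) []]) []
      (pyProduct res).foldl (fun res2 r => res2 ++ [PySem.Str.join " " r]) []

-- ===== PORT B =====
-- body of B's inner decoding loop: rem, d = divmod(rem, len(vs)); parts.append("-%s=%s" % (k, vs[d]))
-- (vs is never empty here — B filters empty value lists into opts — so divmod and vs[d] never raise)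
def pvDecodeStep (st : Int × List String) (kp : String × List String) : Int × List String :=
  (PySem.Int.floordiv st.1 (kp.2.length : Int),
   st.2 ++ ["-" ++ kp.1 ++ "=" ++ PySem.List.pyGetD kp.2 (PySem.Int.mod st.1 (kp.2.length : Int)) ""])

def getTestFlags_alt (t : List (String × List (String × List String))) : List String :=
  match (PySem.Dict.mk t).get? "flags" with
  | none => []  -- Python raises KeyError here; excluded by Pre_getTestFlags
  | some tflags =>
    if tflags.isEmpty then [""]
    else
      let opts := tflags.foldl (fun opts kp =>
        let vs := ((PySem.Dict.mk tflags).get? kp.1).getD []  -- tflags[k]; k comes from keys, so never a KeyError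
        if vs = [] then opts else opts ++ [(kp.1, vs)]) []
      let total : Int := opts.foldl (fun tot kp => tot * (kp.2.length : Int)) 1
      (PySem.List.pyRange 0 total 1).foldl (fun out i =>
        let st := opts.reverse.foldl pvDecodeStep (i, [])
        out ++ [PySem.Str.join " " st.2.reverse]) []

-- ===== PRECONDITION & SPEC =====
-- Pre_ excludes exactly the inputs without a "flags" key, on which the Python A raises KeyError.
def Pre_getTestFlags (t : List (String × List (String × List String))) : Prop :=
  "flags" ∈ t.map (·.1)
instance (t : List (String × List (String × List String))) : Decidable (Pre_getTestFlags t) := by unfold Pre_getTestFlags; infer_instance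

def pvWitness_getTestFlags : (List (String × List (String × List String))) :=
  [("flags", [("k", ["v1", "v2"]), ("m", ["w"])])]

def Spec_getTestFlags (t : List (String × List (String × List String))) (out : List String) : Prop := out = getTestFlags_alt t
instance (t : List (String × List (String × List String))) (out : List String) : Decidable (Spec_getTestFlags t out) := by unfold Spec_getTestFlags; infer_instance

-- ===== CLAIM (what is proved, stated in full; the proofs are below) =====
def Claim_equal_getTestFlags : Prop := ∀ (t : List (String × List (String × List String))), Dom_getTestFlags t → Pre_getTestFlags t → Spec_getTestFlags t (getTestFlags t)

-- ===== LEMMAS AND PROOFS =====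

def pvFlag (k v : String) : String := "-" ++ k ++ "=" ++ v

-- the product of the value-list lengths, as a Nat
def pvT (opts : List (String × List String)) : Nat :=
  opts.foldl (fun n kp => n * kp.2.length) 1

-- front-recursive characterisation of B's reversed decoding fold
def pvDecN (opts : List (String × List String)) (i : Nat) : List String :=
  match opts with
  | [] => []
  | kp :: rest =>
      pvFlag kp.1 (kp.2.getD ((i / pvT rest) % kp.2.length) "") :: pvDecN rest i

lemma pvT_init (opts : List (String × List String)) :
    ∀ c : Nat, opts.foldl (fun n kp => n * kp.2.length) c = c * pvT opts := by
  induction opts with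
  | nil => intro c; simp [pvT]
  | cons kp rest ih =>
    intro c
    simp only [pvT, List.foldl_cons] at *
    rw [ih (c * kp.2.length), ih (1 * kp.2.length)]
    ring

lemma pvT_cons (kp : String × List String) (rest : List (String × List String)) :
    pvT (kp :: rest) = kp.2.length * pvT rest := by
  show List.foldl _ _ _ = _
  rw [List.foldl_cons, pvT_init]
  ring

lemma pvT_pos (opts : List (String × List String)) (h : ∀ kp ∈ opts, kp.2 ≠ []) :
    0 < pvT opts := by
  induction opts with
  | nil => simp [pvT]
  | cons kp rest ih =>
    rw [pvT_cons]
    have h1 : kp.2 ≠ [] := h kp (by simp)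
    have : 0 < kp.2.length := List.length_pos_iff.mpr h1
    exact Nat.mul_pos this (ih (fun q hq => h q (by simp [hq])))

lemma pvIntFold (opts : List (String × List String)) :
    ∀ c : Nat, opts.foldl (fun tot kp => tot * (kp.2.length : Int)) (c : Int)
      = ((opts.foldl (fun n kp => n * kp.2.length) c : Nat) : Int) := by
  induction opts with
  | nil => intro c; simp
  | cons kp rest ih =>
    intro c
    simp only [List.foldl_cons]
    have : (c : Int) * (kp.2.length : Int) = ((c * kp.2.length : Nat) : Int) := by push_cast; ring
    rw [this, ih]

lemma pvTotalInt (opts : List (String × List String)) :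
    opts.foldl (fun tot kp => tot * (kp.2.length : Int)) 1 = ((pvT opts : Nat) : Int) := by
  have h := pvIntFold opts 1
  simpa [pvT] using h

-- full characterisation of B's reversed fold
lemma pvDec_aux (opts : List (String × List String)) :
    ∀ i : Nat,
      opts.reverse.foldl pvDecodeStep ((i : Int), [])
        = (((i / pvT opts : Nat) : Int), (pvDecN opts i).reverse) := by
  induction opts with
  | nil => intro i; simp [pvT, pvDecN]
  | cons kp rest ih =>
    intro i
    rw [List.reverse_cons, List.foldl_append, ih i]
    simp only [List.foldl_cons, List.foldl_nil, pvDecodeStep, pvDecN, pvT_cons]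
    refine Prod.ext ?_ ?_
    · show PySem.Int.floordiv ((i / pvT rest : Nat) : Int) ((kp.2.length : Nat) : Int) = _
      rw [PySem.Int.floordiv_natCast]
      congr 1
      rw [Nat.div_div_eq_div_mul, Nat.mul_comm]
    · show _ ++ [_] = _
      rw [List.reverse_cons]
      congr 3
      show PySem.List.pyGetD kp.2 (PySem.Int.mod ((i / pvT rest : Nat) : Int) ((kp.2.length : Nat) : Int)) "" = _
      rw [PySem.Int.mod_natCast, PySem.List.pyGetD_natCast]

-- the decoded digits depend on the index only modulo the total count
lemma pvDecN_add_mul (opts : List (String × List String)) (h : ∀ kp ∈ opts, kp.2 ≠ []) :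
    ∀ r q : Nat, pvDecN opts (r + q * pvT opts) = pvDecN opts r := by
  induction opts with
  | nil => intro r q; simp [pvDecN]
  | cons kp rest ih =>
    intro r q
    have hrest : ∀ x ∈ rest, x.2 ≠ [] := fun x hx => h x (by simp [hx])
    have hT : 0 < pvT rest := pvT_pos rest hrest
    have hmul : r + q * pvT (kp :: rest) = r + q * kp.2.length * pvT rest := by
      rw [pvT_cons]; ring
    simp only [pvDecN, hmul]
    rw [Nat.add_mul_div_right _ _ hT, Nat.add_mul_mod_self_right, ih hrest r (q * kp.2.length)]

lemma pvDecN_cons (kp : String × List String) (rest : List (String × List String))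
    (hrest : ∀ x ∈ rest, x.2 ≠ [])
    (q r : Nat) (hq : q < kp.2.length) (hr : r < pvT rest) :
    pvDecN (kp :: rest) (q * pvT rest + r)
      = pvFlag kp.1 (kp.2.getD q "") :: pvDecN rest r := by
  have hT : 0 < pvT rest := Nat.lt_of_le_of_lt (Nat.zero_le r) hr
  simp only [pvDecN]
  rw [Nat.add_comm (q * pvT rest) r, Nat.add_mul_div_right _ _ hT, Nat.div_eq_of_lt hr,
    Nat.zero_add, Nat.mod_eq_of_lt hq, pvDecN_add_mul rest hrest r q]

lemma pvRangeMul (a b : Nat) :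
    List.range (a * b) = (List.range a).flatMap (fun q => (List.range b).map (fun r => q * b + r)) := by
  induction a with
  | zero => simp
  | succ a ih =>
    rw [Nat.succ_mul, List.range_add, ih, List.range_succ, List.flatMap_append]
    simp

lemma pvFlatMap_range (l : List String) (g : String → List (List String)) :
    ∀ d : String, l.flatMap g = (List.range l.length).flatMap (fun q => g (l.getD q d)) := by
  induction l with
  | nil => intro d; simp
  | cons x xs ih =>
    intro d
    rw [List.flatMap_cons, List.length_cons, List.range_succ_eq_map, List.flatMap_cons,
      List.flatMap_map, ih d]
    simp

-- core: enumerating indices and decoding them yields exactly itertools.product's output order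
lemma pvMainDec (opts : List (String × List String)) (h : ∀ kp ∈ opts, kp.2 ≠ []) :
    (List.range (pvT opts)).map (fun n => pvDecN opts n)
      = pyProduct (opts.map (fun kp => kp.2.map (pvFlag kp.1))) := by
  induction opts with
  | nil => simp [pvT, pvDecN, pyProduct]
  | cons kp rest ih =>
    have hrest : ∀ q ∈ rest, q.2 ≠ [] := fun q hq => h q (by simp [hq])
    rw [pvT_cons, pvRangeMul, List.map_flatMap, List.map_cons]
    simp only [pyProduct]
    rw [← ih hrest, pvFlatMap_range (kp.2.map (pvFlag kp.1)) _ (pvFlag kp.1 "")]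
    rw [List.length_map]
    apply List.flatMap_congr
    intro q hq
    have hq' : q < kp.2.length := List.mem_range.mp hq
    rw [List.map_map, List.map_map]
    apply List.map_congr_left
    intro r hr
    have hr' : r < pvT rest := List.mem_range.mp hr
    simp only [Function.comp_def]
    rw [pvDecN_cons kp rest hrest q r hq' hr']
    congr 1
    rw [List.getD_eq_getElem _ _ hq', List.getD_eq_getElem _ _ (by simpa using hq')]
    simp [pvFlag]

-- A's per-key list build, as filter+map
lemma pvA_res (gg : String → List String) (tflags : List (String × List String)) :
    List.foldl (fun res kp =>
        if (gg kp.1).length = 0 then res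
        else res ++ [List.foldl (fun temp v => temp ++ ["-" ++ kp.1 ++ "=" ++ v]) [] (gg kp.1)]) [] tflags
      = (tflags.filter (fun kp => decide (¬ gg kp.1 = []))).map
          (fun kp => (gg kp.1).map (pvFlag kp.1)) := by
  have h0 := PySem.List.foldl_append_ite (fun kp : String × List String => ¬ gg kp.1 = [])
      (fun kp => (gg kp.1).map (pvFlag kp.1)) tflags []
  simp only [List.nil_append] at h0
  rw [← h0]
  apply PySem.List.foldl_congr_mem
  intro acc kp _
  by_cases hc : gg kp.1 = []
  · simp [hc]
  · have hl : ¬ (gg kp.1).length = 0 := by simp [hc]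
    simp only [hl, if_false, hc]
    congr 1
    rw [PySem.List.foldl_append_singleton_eq_map, List.nil_append]
    rfl

-- B's opts build, as filter+map
lemma pvB_opts (gg : String → List String) (tflags : List (String × List String)) :
    List.foldl (fun opts kp => if gg kp.1 = [] then opts else opts ++ [(kp.1, gg kp.1)]) [] tflags
      = (tflags.filter (fun kp => decide (¬ gg kp.1 = []))).map (fun kp => (kp.1, gg kp.1)) := by
  have h0 := PySem.List.foldl_append_ite (fun kp : String × List String => ¬ gg kp.1 = [])
      (fun kp => (kp.1, gg kp.1)) tflags []
  simp only [List.nil_append] at h0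
  rw [← h0]
  apply PySem.List.foldl_congr_mem
  intro acc kp _
  by_cases hc : gg kp.1 = [] <;> simp [hc]

-- ===== VERDICT (by name: the statement is the Claim_ definition above) =====
theorem getTestFlags_spec : Claim_equal_getTestFlags := by
  intro t _ _
  unfold Spec_getTestFlags getTestFlags getTestFlags_alt
  cases hd : (PySem.Dict.mk t).get? "flags" with
  | none => rfl
  | some tflags =>
    by_cases he : tflags.isEmpty
    · simp [he]
    · simp only [he, Bool.false_eq_true, if_false]
      set gg : String → List String := fun k => ((PySem.Dict.mk tflags).get? k).getD [] with hgg
      set opts := (tflags.filter (fun kp => decide (¬ gg kp.1 = []))).map (fun kp => (kp.1, gg kp.1)) with hopts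
      have hne : ∀ kp ∈ opts, kp.2 ≠ [] := by
        intro kp hkp
        rw [hopts] at hkp
        obtain ⟨q, hq, rfl⟩ := List.mem_map.mp hkp
        have := List.of_mem_filter hq
        simpa using this
      rw [pvA_res gg tflags, pvB_opts gg tflags, ← hopts]
      rw [pvTotalInt opts]
      rw [PySem.List.foldl_append_singleton_eq_map, PySem.List.foldl_append_singleton_eq_map]
      simp only [List.nil_append]
      rw [PySem.List.pyRange_zero_nat, List.map_map]
      have hcomp : (tflags.filter (fun kp => decide (¬ gg kp.1 = []))).map
            (fun kp => (gg kp.1).map (pvFlag kp.1))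
          = opts.map (fun kp => kp.2.map (pvFlag kp.1)) := by
        rw [hopts, List.map_map]; rfl
      rw [hcomp, ← pvMainDec opts hne, List.map_map]
      apply List.map_congr_left
      intro n _
      simp only [Function.comp_def]
      rw [pvDec_aux opts n]
      simp
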